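-- pv_equiv track=rewrite | github.com/waelbenamara/RelML | benchmarks/pl_predict.py | _fuzzy_team_id
-- ===== SOURCE A (Python) =====
-- def _fuzzy_team_id(name: str, name_map: dict):
--     """Match team name case-insensitively, with partial matching fallback."""
--     name_lower = name.lower()
--     for k, v in name_map.items():
--         if k.lower() == name_lower:
--             return v
--     for k, v in name_map.items():
--         if name_lower in k.lower() or k.lower() in name_lower:
--             return v
--     return None
-- ===== SOURCE B (Python) =====
-- def _fuzzy_team_id(name: str, name_map: dict):
--     """Match team name case-insensitively, with partial matching fallback.
--
--     Single pass: exact (case-insensitive) match returns immediately;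
--     the first substring match is remembered as a fallback."""
--     name_lower = name.lower()
--     fallback = None
--     for k, v in name_map.items():
--         klow = k.lower()
--         if klow == name_lower:
--             return v
--         if fallback is None and (name_lower in klow or klow in name_lower):
--             fallback = v
--     return fallback
-- ===== Notes on version B (the rewrite author's own statement) =====
-- stated objective: alternative
-- what changed: One pass with a remembered fallback (each key lowered once) replaces A's two sequential scans over the map.
import Mathlib
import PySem

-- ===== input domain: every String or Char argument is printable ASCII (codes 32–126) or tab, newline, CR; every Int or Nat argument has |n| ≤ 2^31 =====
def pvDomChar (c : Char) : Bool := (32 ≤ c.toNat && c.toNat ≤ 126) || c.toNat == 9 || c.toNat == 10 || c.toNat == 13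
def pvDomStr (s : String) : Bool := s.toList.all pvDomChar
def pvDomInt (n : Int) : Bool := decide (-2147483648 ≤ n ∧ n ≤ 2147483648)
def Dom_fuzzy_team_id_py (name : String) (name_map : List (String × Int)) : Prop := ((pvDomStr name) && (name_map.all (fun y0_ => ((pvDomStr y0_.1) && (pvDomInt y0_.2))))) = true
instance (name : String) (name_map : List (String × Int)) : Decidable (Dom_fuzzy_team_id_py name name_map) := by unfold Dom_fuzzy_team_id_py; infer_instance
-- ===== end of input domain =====

-- B replaces A's two sequential scans with a single pass that remembers the first
-- substring match as a fallback (each key lowered once); alternative decomposition, same result.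


-- ===== PORT A =====
-- first loop of A: return v for the first key with k.lower() == name_lower
def faExact (nl : String) : List (String × Int) → Option Int
  | [] => none
  | (k, v) :: rest =>
    if PySem.Str.lower k == nl then some v else faExact nl rest

-- second loop of A: return v for the first key with a substring relation either way
def faSub (nl : String) : List (String × Int) → Option Int
  | [] => none
  | (k, v) :: rest =>
    if PySem.Str.isIn nl (PySem.Str.lower k) || PySem.Str.isIn (PySem.Str.lower k) nl
    then some v else faSub nl rest

def fuzzy_team_id_py (name : String) (name_map : List (String × Int)) : Option Int :=
  let name_lower := PySem.Str.lower name
  match faExact name_lower name_map with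
  | some v => some v
  | none =>
    match faSub name_lower name_map with
    | some v => some v
    | none => none

-- ===== PORT B =====
-- single pass carrying the fallback recorded so far
def fbLoop (nl : String) (fallback : Option Int) : List (String × Int) → Option Int
  | [] => fallback
  | (k, v) :: rest =>
    let klow := PySem.Str.lower k
    if klow == nl then some v
    else if fallback.isNone && (PySem.Str.isIn nl klow || PySem.Str.isIn klow nl)
    then fbLoop nl (some v) rest
    else fbLoop nl fallback rest

def fuzzy_team_id_py_alt (name : String) (name_map : List (String × Int)) : Option Int :=
  fbLoop (PySem.Str.lower name) none name_map

-- ===== PRECONDITION & SPEC =====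
def Spec_fuzzy_team_id_py (name : String) (name_map : List (String × Int)) (out : Option Int) : Prop := out = fuzzy_team_id_py_alt name name_map
instance (name : String) (name_map : List (String × Int)) (out : Option Int) : Decidable (Spec_fuzzy_team_id_py name name_map out) := by unfold Spec_fuzzy_team_id_py; infer_instance

-- ===== CLAIM (what is proved, stated in full; the proofs are below) =====
def Claim_equal_fuzzy_team_id_py : Prop := ∀ (name : String) (name_map : List (String × Int)), Dom_fuzzy_team_id_py name name_map → Spec_fuzzy_team_id_py name name_map (fuzzy_team_id_py name name_map)

-- ===== LEMMAS AND PROOFS =====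
-- loop invariant: B's single pass equals "first exact match, else the carried fallback,
-- else the first substring match of the remaining list"
theorem fbLoop_eq (nl : String) : ∀ (l : List (String × Int)) (fb : Option Int),
    fbLoop nl fb l =
      match faExact nl l with
      | some v => some v
      | none => match fb with
        | some x => some x
        | none => faSub nl l := by
  intro l
  induction l with
  | nil => intro fb; cases fb <;> simp [fbLoop, faExact, faSub]
  | cons p rest ih =>
    intro fb
    obtain ⟨k, v⟩ := p
    by_cases h1 : PySem.Str.lower k == nl
    · simp [fbLoop, faExact, h1]
    · by_cases h2 : (PySem.Str.isIn nl (PySem.Str.lower k) || PySem.Str.isIn (PySem.Str.lower k) nl) = true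
      · simp at h2
        cases fb with
        | none => simp [fbLoop, faExact, faSub, h1, h2, ih]
        | some x => simp [fbLoop, faExact, faSub, h1, h2, ih]
      · simp at h2
        cases fb with
        | none => simp [fbLoop, faExact, faSub, h1, h2, ih]
        | some x => simp [fbLoop, faExact, faSub, h1, h2, ih]

-- ===== VERDICT (by name: the statement is the Claim_ definition above) =====
theorem fuzzy_team_id_py_spec : Claim_equal_fuzzy_team_id_py := by
  intro name name_map _
  unfold Spec_fuzzy_team_id_py fuzzy_team_id_py fuzzy_team_id_py_alt
  rw [fbLoop_eq]
  cases h1 : faExact (PySem.Str.lower name) name_map <;>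
    cases h2 : faSub (PySem.Str.lower name) name_map <;> simp [h1, h2]
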